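-- pv_equiv track=rewrite | github.com/pypi-data/pypi-mirror-401 | packages/duhast/duhast-1.2.2.tar.gz/duhast-1.2.2/src/duHast/Revit/Family/Reporting/report_differences_in_reports.py | compare_outer_join_result_with_report
-- ===== SOURCE A (Python) =====
-- def _build_report_dict(reports):
--     # build a dictionary of the report
--     report_dic = {}
--     for report in reports:
--         for report_name, report_content in report.items():
--             for row in report_content [1:]:
--                 family_name = row[1]
--                 family_category = row[2]
--                 type_name = row[3]
--                 parameter_name = row[6]
--                 value = row[10]
--                 report_dic[(family_name, family_category, type_name, parameter_name)] = value
--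
--     return report_dic
--
-- def compare_outer_join_result_with_report(report, outer_join_result):
--
--     # build a dictionary from the report:
--     report_dict = _build_report_dict(report)
--
--     # Get all unique keys from both reports
--     all_keys = set(report_dict.keys()).union(set(outer_join_result.keys()))
--
--     # get the number of paddings required for the outer join result
--     n_a_value = "N/A"
--     padding_length = 2
--     for key in outer_join_result:
--         padding_length = len(outer_join_result[key])
--         break
--
--     # Perform the outer join:
--     # if there is a match for a key in both dictionaries, then the value of the report need to be added to the outer join result for that key, which is a tuple of values
--     # if there is no match for a key from the outer join result in the report, then N?A needs to be added to the outer join result for that key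
--     # if there is no match for a key from the report in the outer join result, then the key needs to be added to the outer join result and the value of the report need to be added
--     # but the value needs to be padded with N/A for the other reports
--
--     for key in all_keys:
--         if key in report_dict:
--             if key in outer_join_result:
--                 outer_join_result[key] = outer_join_result[key] + [report_dict[key],]
--             else:
--                 outer_join_result[key] = [n_a_value for _ in range(padding_length)] + [report_dict[key],]
--         else:
--             outer_join_result[key] = outer_join_result[key] + [n_a_value,]
--
--     return outer_join_result
-- ===== SOURCE B (Python) =====
-- # B: no union-set; one merged dict consumed by pop in a pass over the existing
-- # keys, then the leftovers appended. Mutates outer_join_result (and its value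
-- # lists) in place, like A mutates outer_join_result; the equivalence claimed is
-- # about the return value.
-- def compare_outer_join_result_with_report(report, outer_join_result):
--     # flatten all reports into one key -> value dict (last row wins)
--     merged = {}
--     for rep in report:
--         for rows in rep.values():
--             for row in rows[1:]:
--                 merged[(row[1], row[2], row[3], row[6])] = row[10]
--
--     # padding = width of the existing value lists (2 if there are none)
--     padding = next((len(v) for v in outer_join_result.values()), 2)
--
--     # pass 1: extend every existing row with its report value (or N/A),
--     # removing consumed keys from merged
--     for key, value in outer_join_result.items():
--         value.append(merged.pop(key, "N/A"))
--
--     # pass 2: whatever is left in merged is new; pad and append it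
--     for key, value in merged.items():
--         outer_join_result[key] = ["N/A"] * padding + [value]
--
--     return outer_join_result
-- ===== Notes on version B (the rewrite author's own statement) =====
-- stated objective: simpler
-- what changed: B drops the union-set of keys entirely: it builds one merged report dict, extends every existing outer-join row in a single pass that pops its key from the merged dict, and then appends the padded leftovers - instead of A's three-way branch over a set union of both key sets.
import Mathlib
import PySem

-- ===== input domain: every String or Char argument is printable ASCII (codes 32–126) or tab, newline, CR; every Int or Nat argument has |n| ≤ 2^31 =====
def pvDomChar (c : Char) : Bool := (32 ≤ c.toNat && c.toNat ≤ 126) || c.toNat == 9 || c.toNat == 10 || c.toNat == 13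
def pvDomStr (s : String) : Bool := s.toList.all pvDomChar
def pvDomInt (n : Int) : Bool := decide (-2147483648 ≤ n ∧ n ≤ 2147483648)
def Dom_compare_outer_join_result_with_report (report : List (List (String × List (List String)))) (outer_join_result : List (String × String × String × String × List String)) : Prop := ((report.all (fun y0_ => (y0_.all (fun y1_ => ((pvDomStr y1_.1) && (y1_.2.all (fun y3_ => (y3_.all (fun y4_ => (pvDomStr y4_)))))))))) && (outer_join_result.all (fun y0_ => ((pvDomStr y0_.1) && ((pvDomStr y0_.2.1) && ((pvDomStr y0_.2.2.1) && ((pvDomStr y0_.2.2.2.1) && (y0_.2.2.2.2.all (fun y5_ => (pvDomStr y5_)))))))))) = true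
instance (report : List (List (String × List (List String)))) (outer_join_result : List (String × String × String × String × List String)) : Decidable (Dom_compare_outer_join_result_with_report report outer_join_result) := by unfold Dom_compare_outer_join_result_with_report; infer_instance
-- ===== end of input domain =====

-- B drops A's union-set of keys: one merged report dict is consumed by a pop-pass over the
-- existing outer-join rows and its leftovers are appended (objective: simpler).
-- Both Pythons mutate outer_join_result in place; the equivalence proved is about the return value.

-- shared type-convention plumbing: the Python dicts are keyed by 4-tuples of strings;
-- the flat 5-tuple list at the boundary is (un)packed by these helpers.
abbrev pvK : Type := String × String × String × String

def pvFlat (p : pvK × List String) : String × String × String × String × List String :=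
  (p.1.1, p.1.2.1, p.1.2.2.1, p.1.2.2.2, p.2)

def pvPairs (outer : List (String × String × String × String × List String)) : List (pvK × List String) :=
  outer.map (fun e => ((e.1, e.2.1, e.2.2.1, e.2.2.2.1), e.2.2.2.2))

-- ===== PORT A =====
-- row[1], row[2], row[3], row[6] (tuple key); pyGetD's default is unreachable under Pre_
def pvRowKey (row : List String) : pvK :=
  (PySem.List.pyGetD row 1 "", PySem.List.pyGetD row 2 "", PySem.List.pyGetD row 3 "",
   PySem.List.pyGetD row 6 "")

def pv_build_report_dict (reports : List (List (String × List (List String)))) :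
    PySem.Dict pvK String :=
  reports.foldl (fun d rep =>
    (PySem.Dict.ofList rep).items.foldl (fun d rc =>
      (PySem.List.slice rc.2 (some 1) none).foldl (fun d row =>
        d.insert (pvRowKey row) (PySem.List.pyGetD row 10 "")) d) d)
    PySem.Dict.empty

def compare_outer_join_result_with_report (report : List (List (String × List (List String)))) (outer_join_result : List (String × String × String × String × List String)) : List (String × String × String × String × List String) :=
  let report_dict := pv_build_report_dict report
  let ojr : PySem.Dict pvK (List String) := PySem.Dict.ofList (pvPairs outer_join_result)
  let all_keys : PySem.Set pvK :=
    PySem.Set.union (PySem.Set.ofList report_dict.keys) (PySem.Set.ofList ojr.keys)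
  -- padding_length = 2; for key in outer_join_result: padding_length = len(outer_join_result[key]); break
  let padding_length : Nat :=
    match ojr.keys with
    | [] => 2
    | key :: _ => (ojr.getD key []).length
  let final := all_keys.foldl (fun d key =>
    if report_dict.contains key then
      if d.contains key then
        d.insert key (d.getD key [] ++ [report_dict.getD key ""])
      else
        d.insert key (List.replicate padding_length "N/A" ++ [report_dict.getD key ""])
    else
      d.insert key (d.getD key [] ++ ["N/A"])) ojr
  final.items.map pvFlat

-- ===== PORT B =====
def compare_outer_join_result_with_report_alt (report : List (List (String × List (List String)))) (outer_join_result : List (String × String × String × String × List String)) : List (String × String × String × String × List String) :=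
  -- merged: one flat key -> value dict over all reports
  let merged := report.foldl (fun m rep =>
    (PySem.Dict.ofList rep).values.foldl (fun m rows =>
      (PySem.List.slice rows (some 1) none).foldl (fun m row =>
        m.insert (pvRowKey row) (PySem.List.pyGetD row 10 "")) m) m)
    PySem.Dict.empty
  let ojr : PySem.Dict pvK (List String) := PySem.Dict.ofList (pvPairs outer_join_result)
  -- padding = next((len(v) for v in outer_join_result.values()), 2)
  let padding : Nat :=
    match ojr.values with
    | [] => 2
    | v :: _ => v.length
  -- pass 1: value.append(merged.pop(key, "N/A")) for every existing row
  let step1 := ojr.items.foldl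
    (fun (st : List (pvK × List String) × PySem.Dict pvK String) p =>
      (st.1 ++ [(p.1, p.2 ++ [st.2.getD p.1 "N/A"])], st.2.erase p.1))
    ([], merged)
  -- pass 2: pad and append the leftovers of merged
  (step1.1 ++ step1.2.items.map (fun p => (p.1, List.replicate padding "N/A" ++ [p.2]))).map pvFlat

-- ===== PRECONDITION & SPEC =====
-- Pre_ excludes exactly the inputs where Python A raises IndexError: a data row (any row after
-- the header of an effective report entry) with fewer than 11 columns, which row[10] rejects.
def Pre_compare_outer_join_result_with_report (report : List (List (String × List (List String)))) (outer_join_result : List (String × String × String × String × List String)) : Prop :=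
  ∀ rep ∈ report, ∀ rc ∈ (PySem.Dict.ofList rep).items, ∀ row ∈ rc.2.tail, 11 ≤ row.length
instance (report : List (List (String × List (List String)))) (outer_join_result : List (String × String × String × String × List String)) : Decidable (Pre_compare_outer_join_result_with_report report outer_join_result) := by unfold Pre_compare_outer_join_result_with_report; infer_instance

def pvWitness_compare_outer_join_result_with_report : (List (List (String × List (List String)))) × (List (String × String × String × String × List String)) :=
  ([[("r", [["h"], ["c0", "Fam", "Cat", "Typ", "c4", "c5", "Par", "c7", "c8", "c9", "Val"]])]],
   [("Fam", "Cat", "Typ", "Par", ["a", "b"]), ("F2", "C2", "T2", "P2", ["c", "d"])])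

def Spec_compare_outer_join_result_with_report (report : List (List (String × List (List String)))) (outer_join_result : List (String × String × String × String × List String)) (out : List (String × String × String × String × List String)) : Prop := out = compare_outer_join_result_with_report_alt report outer_join_result
instance (report : List (List (String × List (List String)))) (outer_join_result : List (String × String × String × String × List String)) (out : List (String × String × String × String × List String)) : Decidable (Spec_compare_outer_join_result_with_report report outer_join_result out) := by unfold Spec_compare_outer_join_result_with_report; infer_instance

-- ===== CLAIM (what is proved, stated in full; the proofs are below) =====
def Claim_equal_compare_outer_join_result_with_report : Prop := ∀ (report : List (List (String × List (List String)))) (outer_join_result : List (String × String × String × String × List String)), Dom_compare_outer_join_result_with_report report outer_join_result → Pre_compare_outer_join_result_with_report report outer_join_result → Spec_compare_outer_join_result_with_report report outer_join_result (compare_outer_join_result_with_report report outer_join_result)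


-- ===== LEMMAS AND PROOFS =====

-- A's loop body over all_keys, named for the proofs
def pvStepA (R : PySem.Dict pvK String) (pad : Nat)
    (d : PySem.Dict pvK (List String)) (key : pvK) : PySem.Dict pvK (List String) :=
  if R.contains key then
    if d.contains key then
      d.insert key (d.getD key [] ++ [R.getD key ""])
    else
      d.insert key (List.replicate pad "N/A" ++ [R.getD key ""])
  else
    d.insert key (d.getD key [] ++ ["N/A"])

-- lookup with default "N/A" written as A's contains-branch
lemma pv_getD_na (R : PySem.Dict pvK String) (k : pvK) :
    R.getD k "N/A" = if R.contains k then R.getD k "" else "N/A" := by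
  by_cases h : R.contains k
  · rw [if_pos h, PySem.Dict.contains_eq_isSome_get?] at *
    cases hg : R.get? k with
    | none => rw [hg] at h; simp at h
    | some v =>
        rw [PySem.Dict.getD_of_get?_eq_some R "N/A" hg, PySem.Dict.getD_of_get?_eq_some R "" hg]
  · rw [if_neg h, PySem.Dict.getD_of_not_contains R "N/A" (by simpa using h)]

-- the nested report folds only insert, so keys stay Nodup
lemma pv_nodup_step (d : PySem.Dict pvK String) (hd : d.keys.Nodup)
    (rep : List (String × List (List String))) :
    (((PySem.Dict.ofList rep).items.foldl (fun d rc =>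
      (PySem.List.slice rc.2 (some 1) none).foldl (fun d row =>
        d.insert (pvRowKey row) (PySem.List.pyGetD row 10 "")) d) d)).keys.Nodup := by
  induction (PySem.Dict.ofList rep).items generalizing d with
  | nil => exact hd
  | cons rc l ih =>
      exact ih _ (PySem.Dict.nodup_keys_foldl_insert_key _ pvRowKey
        (fun _ row => PySem.List.pyGetD row 10 "") d hd)

lemma pv_nodup_keys_build (reports : List (List (String × List (List String)))) :
    (pv_build_report_dict reports).keys.Nodup := by
  unfold pv_build_report_dict
  generalize hD : PySem.Dict.empty = D
  have hd : D.keys.Nodup := by rw [← hD]; exact PySem.Dict.nodup_keys_empty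
  clear hD
  induction reports generalizing D with
  | nil => exact hd
  | cons rep l ih => exact ih _ (pv_nodup_step D hd rep)

-- B's merged dict IS A's report dict (values-fold = items-fold through the second component)
lemma pv_merged_eq (report : List (List (String × List (List String)))) :
    report.foldl (fun m rep =>
      (PySem.Dict.ofList rep).values.foldl (fun m rows =>
        (PySem.List.slice rows (some 1) none).foldl (fun m row =>
          m.insert (pvRowKey row) (PySem.List.pyGetD row 10 "")) m) m)
      PySem.Dict.empty = pv_build_report_dict report := by
  unfold pv_build_report_dict
  congr 1
  funext m rep
  rw [PySem.Dict.values, List.foldl_map]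

-- A's three-way branch is one insert with a branched value
lemma pvStepA_eq (R : PySem.Dict pvK String) (pad : Nat) (d : PySem.Dict pvK (List String)) (k : pvK) :
    pvStepA R pad d k
      = d.insert k (if d.contains k then d.getD k [] ++ [R.getD k "N/A"]
          else (if R.contains k then List.replicate pad "N/A" ++ [R.getD k ""] else ["N/A"])) := by
  unfold pvStepA
  by_cases hc : d.contains k
  · by_cases hr : R.contains k <;> simp [hc, hr, pv_getD_na]
  · by_cases hr : R.contains k <;>
      simp [hc, hr, PySem.Dict.getD_of_not_contains d [] (by simpa using hc)]

-- the A-side fold over a Nodup key list, characterised: existing entries are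
-- extended in place, fresh keys are appended in key-list order
lemma pv_foldA (R : PySem.Dict pvK String) (pad : Nat) (ks : List pvK)
    (d : PySem.Dict pvK (List String)) (hks : ks.Nodup) (hd : d.keys.Nodup) :
    (ks.foldl (pvStepA R pad) d).items
      = d.items.map (fun p => if p.1 ∈ ks then (p.1, p.2 ++ [R.getD p.1 "N/A"]) else p)
        ++ (ks.filter (fun k => !d.contains k)).map
            (fun k => if R.contains k then (k, List.replicate pad "N/A" ++ [R.getD k ""])
                      else (k, ["N/A"])) := by
  induction ks generalizing d with
  | nil => simp
  | cons k ks ih =>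
    have hknotin : k ∉ ks := (List.nodup_cons.mp hks).1
    have hd' : (pvStepA R pad d k).keys.Nodup := by
      rw [pvStepA_eq]; exact PySem.Dict.nodup_keys_insert d _ _ hd
    rw [List.foldl_cons, ih (pvStepA R pad d k) (List.nodup_cons.mp hks).2 hd']
    have hcont' : ∀ j ∈ ks, (pvStepA R pad d k).contains j = d.contains j := by
      intro j hj
      rw [pvStepA_eq, PySem.Dict.contains_insert]
      have : (j == k) = false := by
        simp only [beq_eq_false_iff_ne, ne_eq]; intro he; exact hknotin (he ▸ hj)
      rw [this, Bool.false_or]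
    have hfilter : ks.filter (fun j => !(pvStepA R pad d k).contains j)
        = ks.filter (fun j => !d.contains j) :=
      List.filter_congr (fun j hj => by rw [hcont' j hj])
    by_cases hc : d.contains k
    · -- in-place update
      have hitems : (pvStepA R pad d k).items
          = d.items.map (fun p => if p.1 == k then (k, d.getD k [] ++ [R.getD k "N/A"]) else p) := by
        rw [pvStepA_eq, if_pos hc]; exact PySem.Dict.items_insert_of_contains d _ hc
      rw [hitems, hfilter, List.map_map]
      have hmapc : ∀ p ∈ d.items,
          ((fun p => if p.1 ∈ ks then (p.1, p.2 ++ [R.getD p.1 "N/A"]) else p) ∘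
           (fun p => if p.1 == k then (k, d.getD k [] ++ [R.getD k "N/A"]) else p)) p
          = (fun p => if p.1 ∈ (k :: ks) then (p.1, p.2 ++ [R.getD p.1 "N/A"]) else p) p := by
        intro p hp
        by_cases hpk : p.1 = k
        · have hgd : d.getD k [] = p.2 := by
            have : (k, p.2) ∈ d.items := by rw [← hpk]; exact hp
            exact PySem.Dict.getD_of_mem_items d this hd []
          simp [Function.comp, hpk, hknotin, hgd]
        · simp [Function.comp, hpk, List.mem_cons]
      rw [List.map_congr_left hmapc]
      have : (k :: ks).filter (fun j => !d.contains j) = ks.filter (fun j => !d.contains j) := by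
        rw [List.filter_cons, hc]; simp
      rw [this]
    · -- new key appended
      have hval : pvStepA R pad d k = d.insert k
          (if R.contains k then List.replicate pad "N/A" ++ [R.getD k ""] else ["N/A"]) := by
        rw [pvStepA_eq, if_neg hc]
      have hitems : (pvStepA R pad d k).items = d.items ++
          [(k, if R.contains k then List.replicate pad "N/A" ++ [R.getD k ""] else ["N/A"])] := by
        rw [hval]; exact PySem.Dict.items_insert_of_not_contains d _ (by simpa using hc)
      rw [hitems, hfilter, List.map_append]
      have hpne : ∀ p ∈ d.items, p.1 ≠ k := by
        intro p hp he
        have : d.contains p.1 = true := (PySem.Dict.contains_iff_mem_keys d p.1).mpr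
          (List.mem_map_of_mem (f := (·.1)) hp)
        rw [he] at this; exact hc this
      have hmapc : ∀ p ∈ d.items,
          (fun p => if p.1 ∈ ks then (p.1, p.2 ++ [R.getD p.1 "N/A"]) else p) p
          = (fun p => if p.1 ∈ (k :: ks) then (p.1, p.2 ++ [R.getD p.1 "N/A"]) else p) p := by
        intro p hp
        simp [List.mem_cons, hpne p hp]
      rw [List.map_congr_left hmapc]
      have hfc : (k :: ks).filter (fun j => !d.contains j)
          = k :: ks.filter (fun j => !d.contains j) := by
        rw [List.filter_cons]; simp [hc]
      rw [hfc]
      by_cases hr : R.contains k <;> simp [hknotin, hr]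

-- erasing a key leaves every other lookup unchanged
lemma pv_get?_erase_of_ne (m : PySem.Dict pvK String) (j k : pvK) (h : j ≠ k) :
    (m.erase k).get? j = m.get? j := by
  obtain ⟨items⟩ := m
  induction items with
  | nil => rfl
  | cons p l ih =>
      simp only [PySem.Dict.erase, List.filter_cons] at *
      cases hpk : p.1 == k with
      | true =>
          have : (p.1 == j) = false := by
            have := eq_of_beq hpk; simp [this]; intro hj; exact h (hj ▸ rfl)
          simp only [Bool.not_true, PySem.Dict.get?] at *
          simp [this] at ih ⊢
          exact ih
      | false =>
          simp only [Bool.not_false, PySem.Dict.get?] at *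
          cases hpj : p.1 == j <;> simp [hpj] at ih ⊢
          exact ih

-- the B-side pass 1, characterised (the popped keys never shadow a later Nodup key)
lemma pv_foldB (l : List (pvK × List String)) (m : PySem.Dict pvK String)
    (acc : List (pvK × List String)) (hl : (l.map (·.1)).Nodup) :
    (l.foldl (fun (st : List (pvK × List String) × PySem.Dict pvK String) p =>
        (st.1 ++ [(p.1, p.2 ++ [st.2.getD p.1 "N/A"])], st.2.erase p.1)) (acc, m))
      = (acc ++ l.map (fun p => (p.1, p.2 ++ [m.getD p.1 "N/A"])),
         l.foldl (fun m p => m.erase p.1) m) := by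
  induction l generalizing m acc with
  | nil => simp
  | cons p l ih =>
      simp only [List.map, List.foldl_cons]
      rw [ih _ _ (by simpa using hl.of_cons)]
      refine Prod.ext ?_ rfl
      simp only [List.append_assoc, List.singleton_append]
      congr 2
      apply List.map_congr_left
      intro q hq
      have hne : q.1 ≠ p.1 := by
        intro he
        have hmem : p.1 ∈ l.map (·.1) := he ▸ List.mem_map_of_mem (f := (·.1)) hq
        have := (List.nodup_cons.mp hl).1
        exact this hmem
      congr 2
      rw [PySem.Dict.getD_eq_get?_getD, PySem.Dict.getD_eq_get?_getD,
          pv_get?_erase_of_ne m q.1 p.1 hne]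

-- erasing a list of keys = filtering the items
lemma pv_erase_fold (l : List (pvK × List String)) (m : PySem.Dict pvK String) :
    (l.foldl (fun m p => m.erase p.1) m).items
      = m.items.filter (fun q => !(l.any (fun p => q.1 == p.1))) := by
  induction l generalizing m with
  | nil => simp
  | cons p l ih =>
    rw [List.foldl_cons, ih]
    show ((m.erase p.1).items).filter _ = _
    simp only [PySem.Dict.erase, List.any_cons, List.filter_filter]
    apply List.filter_congr
    intro q _
    cases h1 : q.1 == p.1 <;> simp_all

-- the core equality of the two ports, before flattening the key tuples
lemma pv_core (report : List (List (String × List (List String))))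
    (outer_join_result : List (String × String × String × String × List String)) :
    (let R := pv_build_report_dict report
     let O : PySem.Dict pvK (List String) := PySem.Dict.ofList (pvPairs outer_join_result)
     let all_keys : PySem.Set pvK := PySem.Set.union (PySem.Set.ofList R.keys) (PySem.Set.ofList O.keys)
     let padA : Nat := match O.keys with | [] => 2 | key :: _ => (O.getD key []).length
     let padB : Nat := match O.values with | [] => 2 | v :: _ => v.length
     (all_keys.foldl (pvStepA R padA) O).items
       = (O.items.foldl (fun (st : List (pvK × List String) × PySem.Dict pvK String) p =>
            (st.1 ++ [(p.1, p.2 ++ [st.2.getD p.1 "N/A"])], st.2.erase p.1)) ([], R)).1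
         ++ ((O.items.foldl (fun (st : List (pvK × List String) × PySem.Dict pvK String) p =>
            (st.1 ++ [(p.1, p.2 ++ [st.2.getD p.1 "N/A"])], st.2.erase p.1)) ([], R)).2).items.map
              (fun p => (p.1, List.replicate padB "N/A" ++ [p.2]))) := by
  intro R O all_keys padA padB
  have hnR : R.keys.Nodup := pv_nodup_keys_build report
  have hnO : O.keys.Nodup := PySem.Dict.nodup_keys_ofList _
  have hpad : padA = padB := by
    show (match O.keys with | [] => 2 | key :: _ => (O.getD key []).length)
       = (match O.values with | [] => 2 | v :: _ => v.length)
    cases hI : O.items with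
    | nil => simp [PySem.Dict.keys, PySem.Dict.values, hI]
    | cons kv rest =>
        have hO : O = PySem.Dict.mk ((kv.1, kv.2) :: rest) := by
          apply PySem.Dict.ext; simpa using hI
        simp only [PySem.Dict.keys, PySem.Dict.values, hI, List.map_cons]
        rw [PySem.Dict.getD_eq_get?_getD]
        conv_lhs => rw [hO]
        rw [PySem.Dict.get?_mk_cons]
        simp
  have hall : all_keys = R.keys ++ O.keys.filter (fun k => !(R.keys).contains k) := by
    show PySem.Set.union (PySem.Set.ofList R.keys) (PySem.Set.ofList O.keys) = _
    rw [PySem.Set.union, PySem.Set.ofList_eq_self_of_nodup _ hnR,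
        PySem.Set.update_eq_append_filter, PySem.Set.ofList_eq_self_of_nodup _ hnO]
    simp only [PySem.Set.contains_eq_listContains]
    rw [PySem.Set.ofList_eq_self_of_nodup _ hnO]
  have hallnd : all_keys.Nodup :=
    PySem.Set.nodup_union (PySem.Set.ofList R.keys) (PySem.Set.ofList O.keys)
      (by rw [PySem.Set.ofList_eq_self_of_nodup _ hnR]; exact hnR)
  rw [pv_foldA R padA all_keys O hallnd hnO]
  have hkeysO : (O.items.map (·.1)).Nodup := hnO
  rw [pv_foldB O.items R [] hkeysO, pv_erase_fold]
  simp only [List.nil_append]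
  congr 1
  · apply List.map_congr_left
    intro p hp
    have hpin : p.1 ∈ all_keys := by
      have : p.1 ∈ (PySem.Set.ofList O.keys : List pvK) := by
        rw [PySem.Set.ofList_eq_self_of_nodup _ hnO]
        exact List.mem_map_of_mem (f := (·.1)) hp
      exact (PySem.Set.mem_union _ _ _).mpr (Or.inr this)
    simp [hpin]
  · rw [hall, List.filter_append]
    have h2 : (O.keys.filter (fun k => !(R.keys).contains k)).filter (fun k => !O.contains k) = [] := by
      rw [List.filter_filter, List.filter_eq_nil_iff]
      intro k hk
      have : O.contains k := (PySem.Dict.contains_iff_mem_keys O k).mpr hk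
      simp [this]
    rw [h2, List.append_nil]
    rw [PySem.Dict.items_eq_map_keys R hnR "", List.filter_map, List.map_map]
    have hpred : ∀ k ∈ R.keys,
        ((fun q : pvK × String => !(O.items.any (fun p => q.1 == p.1))) ∘ (fun k => (k, R.getD k "")) ) k
        = (fun k => !O.contains k) k := by
      intro k _
      simp [Function.comp, PySem.Dict.contains, Bool.beq_comm]
    rw [List.filter_congr hpred]
    rw [hpad]
    apply List.map_congr_left
    intro k hk
    have hRk : R.contains k := (PySem.Dict.contains_iff_mem_keys R k).mpr (List.mem_filter.mp hk).1
    simp only [Function.comp, hRk, if_pos]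

-- ===== VERDICT (by name: the statement is the Claim_ definition above) =====
theorem compare_outer_join_result_with_report_spec : Claim_equal_compare_outer_join_result_with_report := by
  intro report outer_join_result _ _
  unfold Spec_compare_outer_join_result_with_report
  unfold compare_outer_join_result_with_report compare_outer_join_result_with_report_alt
  rw [pv_merged_eq]
  exact congrArg (List.map pvFlat) (pv_core report outer_join_result)
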